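-- pv_equiv track=rewrite | github.com/schnappischnap/advent_of_code_2019 | day_22_slam_shuffle.py | part_1
-- ===== SOURCE A (Python) =====
-- from collections import deque
--
-- def part_1(data):
--     deck = deque(range(10007))
--     for line in data:
--         line = line.split()
--         if line[-1] == "stack":
--             deck.reverse()
--         elif line[0] == "cut":
--             deck.rotate(-int(line[-1]))
--         elif line[0] == "deal":
--             new_deck = [0]*10007
--             inc = int(line[-1])
--             for i in range(len(deck)):
--                 new_deck[(i*inc) % len(deck)] = deck[i]
--             deck = deque(new_deck)
--     return deck.index(2019)
-- ===== SOURCE B (Python) =====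
-- def part_1(data):
--     n = 10007
--     pos = 2019  # position of card 2019, tracked through the shuffle
--     for line in data:
--         tokens = line.split()
--         if tokens[-1] == "stack":
--             pos = n - 1 - pos
--         elif tokens[0] == "cut":
--             pos = (pos - int(tokens[-1])) % n
--         elif tokens[0] == "deal":
--             pos = (pos * int(tokens[-1])) % n
--     return pos
-- ===== Notes on version B (the rewrite author's own statement) =====
-- stated objective: alternative
-- what changed: B tracks only the position of card 2019 as one modular linear transform per shuffle line (reverse: N-1-p, cut k: (p-k)%N, increment k: p*k%N) instead of simulating the whole 10007-card deck and searching it at the end.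
-- outside the precondition, e.g. on part_1(['cut 2020', 'deal with increment 0']): A returns 0, B returns 0
import Mathlib
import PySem

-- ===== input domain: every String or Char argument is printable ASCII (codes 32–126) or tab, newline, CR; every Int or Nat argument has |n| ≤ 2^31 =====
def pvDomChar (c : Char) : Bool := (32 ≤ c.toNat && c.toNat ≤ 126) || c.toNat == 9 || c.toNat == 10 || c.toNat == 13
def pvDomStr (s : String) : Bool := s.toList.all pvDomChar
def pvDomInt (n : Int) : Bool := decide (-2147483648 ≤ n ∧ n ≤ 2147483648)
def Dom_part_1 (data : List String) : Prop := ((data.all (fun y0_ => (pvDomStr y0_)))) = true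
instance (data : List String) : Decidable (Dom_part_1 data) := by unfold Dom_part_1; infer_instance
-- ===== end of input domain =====

-- B tracks only the position of card 2019 with one modular transform per shuffle line
-- instead of simulating the whole 10007-card deck (objective: alternative).

-- ===== PORT A =====
-- deque.rotate(-k): left rotation by k mod len (exact deque semantics for any k)
def pyRotLeft (deck : List Int) (k : Int) : List Int :=
  let m := (PySem.Int.mod k (deck.length : Int)).toNat
  deck.drop m ++ deck.take m

-- the 'deal with increment' inner loop of A, writing deck[i] to new_deck[(i*inc) % len(deck)]
def pyDeal (deck : List Int) (inc : Int) : List Int :=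
  (PySem.List.pyRange 0 (deck.length : Int) 1).foldl
    (fun nd i =>
      PySem.List.pySetD nd (PySem.Int.mod (i * inc) (deck.length : Int)) (PySem.List.pyGetD deck i 0))
    (List.replicate 10007 0)

def stepA (deck : List Int) (line : String) : List Int :=
  let t := PySem.Str.split₀ line
  if PySem.List.pyGetD t (-1) "" = "stack" then deck.reverse
  else if PySem.List.pyGetD t 0 "" = "cut" then
    pyRotLeft deck ((PySem.Int.ofStr? (PySem.List.pyGetD t (-1) "")).getD 0)
  else if PySem.List.pyGetD t 0 "" = "deal" then
    pyDeal deck ((PySem.Int.ofStr? (PySem.List.pyGetD t (-1) "")).getD 0)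
  else deck

def part_1 (data : List String) : Int :=
  let deck := data.foldl stepA (PySem.List.pyRange 0 10007 1)
  ((PySem.List.index? deck 2019).getD 0 : Nat)

-- ===== PORT B =====
def stepB (pos : Int) (line : String) : Int :=
  let t := PySem.Str.split₀ line
  if PySem.List.pyGetD t (-1) "" = "stack" then 10007 - 1 - pos
  else if PySem.List.pyGetD t 0 "" = "cut" then
    PySem.Int.mod (pos - (PySem.Int.ofStr? (PySem.List.pyGetD t (-1) "")).getD 0) 10007
  else if PySem.List.pyGetD t 0 "" = "deal" then
    PySem.Int.mod (pos * (PySem.Int.ofStr? (PySem.List.pyGetD t (-1) "")).getD 0) 10007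
  else pos

def part_1_alt (data : List String) : Int :=
  data.foldl stepB 2019

-- ===== PRECONDITION & SPEC =====
-- Pre_ excludes lines on which A raises (a blank line: IndexError; a cut/deal line whose
-- last token is not an int literal: ValueError) and 'deal with increment k' lines with k
-- divisible by 10007, on which A collapses the deck onto one cell and raises ValueError at
-- deck.index(2019) except in the accidental case where card 2019 sits at the deck's end.
def preLine (line : String) : Bool :=
  let t := PySem.Str.split₀ line
  if t = [] then false
  else if PySem.List.pyGetD t (-1) "" = "stack" then true
  else if PySem.List.pyGetD t 0 "" = "cut" then
    (PySem.Int.ofStr? (PySem.List.pyGetD t (-1) "")).isSome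
  else if PySem.List.pyGetD t 0 "" = "deal" then
    match PySem.Int.ofStr? (PySem.List.pyGetD t (-1) "") with
    | some k => PySem.Int.mod k 10007 != 0
    | none => false
  else true

def Pre_part_1 (data : List String) : Prop := data.all preLine = true
instance (data : List String) : Decidable (Pre_part_1 data) := by unfold Pre_part_1; infer_instance

def pvWitness_part_1 : List String :=
  ["deal with increment 7", "deal into new stack", "cut -2"]

def Spec_part_1 (data : List String) (out : Int) : Prop := out = part_1_alt data
instance (data : List String) (out : Int) : Decidable (Spec_part_1 data out) := by unfold Spec_part_1; infer_instance

-- ===== CLAIM (what is proved, stated in full; the proofs are below) =====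
def Claim_equal_part_1 : Prop := ∀ (data : List String), Dom_part_1 data → Pre_part_1 data → Spec_part_1 data (part_1 data)

-- ===== LEMMAS AND PROOFS =====

-- Invariant tying A's whole deck to B's single tracked position.
def DeckInv (deck : List Int) (pos : Int) : Prop :=
  deck.length = 10007 ∧ 0 ≤ pos ∧ pos < 10007 ∧
  ∀ q : Nat, q < 10007 → (deck[q]? = some 2019 ↔ (q : Int) = pos)

theorem inv_init : DeckInv (PySem.List.pyRange 0 10007 1) 2019 := by
  refine ⟨by simp [PySem.List.length_pyRange_one], by norm_num, by norm_num, ?_⟩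
  intro q hq
  rw [PySem.List.getElem?_pyRange_one, if_pos (by omega)]
  simp only [Option.some.injEq]
  omega

theorem inv_reverse {deck : List Int} {pos : Int} (h : DeckInv deck pos) :
    DeckInv deck.reverse (10007 - 1 - pos) := by
  obtain ⟨hlen, h0, h1, hq⟩ := h
  refine ⟨by simpa using hlen, by omega, by omega, ?_⟩
  intro q hlt
  rw [List.getElem?_reverse (by omega)]
  rw [hlen]
  rw [hq (10007 - 1 - q) (by omega)]
  omega

theorem inv_rot {deck : List Int} {pos : Int} (h : DeckInv deck pos) (k : Int) :
    DeckInv (pyRotLeft deck k) (PySem.Int.mod (pos - k) 10007) := by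
  obtain ⟨hlen, h0, h1, hq⟩ := h
  unfold pyRotLeft
  have hcast : ((deck.length : Int)) = 10007 := by exact_mod_cast congrArg (Nat.cast : Nat → Int) hlen
  rw [hcast]
  have hk2 : PySem.Int.mod k 10007 = k % 10007 := PySem.Int.mod_eq_emod_of_pos (by norm_num)
  have hpk : PySem.Int.mod (pos - k) 10007 = (pos - k) % 10007 :=
    PySem.Int.mod_eq_emod_of_pos (by norm_num)
  set m := (PySem.Int.mod k 10007).toNat with hmdef
  have hm : (m : Int) = k % 10007 := by
    rw [hmdef, hk2]
    exact Int.toNat_of_nonneg (by rw [← hk2]; exact PySem.Int.mod_nonneg _ (by norm_num))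
  have hmlt : m < 10007 := by omega
  have hlen' : (deck.drop m).length = 10007 - m := by simp [hlen]
  refine ⟨by simp [hlen]; omega, PySem.Int.mod_nonneg _ (by norm_num),
    PySem.Int.mod_lt _ (by norm_num), ?_⟩
  intro q hq'
  rw [hpk]
  by_cases hcase : q < 10007 - m
  · rw [List.getElem?_append_left (by omega), List.getElem?_drop]
    rw [hq (m + q) (by omega)]
    omega
  · rw [List.getElem?_append_right (by omega), hlen', List.getElem?_take,
      if_pos (by omega)]
    rw [hq (q - (10007 - m)) (by omega)]
    omega

-- the write-position map i ↦ (i*inc) % 10007 is injective below 10007 (10007 is prime)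
theorem sigma_inj {inc : Int} (hinc : ¬ (10007 : Int) ∣ inc) {i j : Nat}
    (hi : i < 10007) (hj : j < 10007)
    (hij : ((i : Int) * inc % 10007).toNat = ((j : Int) * inc % 10007).toNat) : i = j := by
  have hp : Prime (10007 : Int) := by rw [Int.prime_iff_natAbs_prime]; norm_num
  have hmodeq : (i : Int) * inc ≡ (j : Int) * inc [ZMOD 10007] := by
    unfold Int.ModEq
    have hnn : (0 : Int) ≤ (i : Int) * inc % 10007 := Int.emod_nonneg _ (by norm_num)
    have hnn' : (0 : Int) ≤ (j : Int) * inc % 10007 := Int.emod_nonneg _ (by norm_num)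
    omega
  have hdvd : (10007 : Int) ∣ ((j : Int) - (i : Int)) * inc := by
    have := hmodeq.dvd
    have heq : (j : Int) * inc - (i : Int) * inc = ((j : Int) - (i : Int)) * inc := by ring
    rwa [heq] at this
  have := (hp.2.2 _ _ hdvd).resolve_right hinc
  omega

theorem deal_fold (deck : List Int) (hlen : deck.length = 10007) (inc : Int)
    (hinc : ¬ (10007 : Int) ∣ inc) (n : Nat) (hn : n ≤ 10007) :
    ((PySem.List.pyRange 0 (n : Int) 1).foldl
        (fun nd i =>
          PySem.List.pySetD nd (PySem.Int.mod (i * inc) 10007) (PySem.List.pyGetD deck i 0))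
        (List.replicate 10007 0)).length = 10007 ∧
    (∀ i : Nat, i < n →
      ((PySem.List.pyRange 0 (n : Int) 1).foldl
        (fun nd i =>
          PySem.List.pySetD nd (PySem.Int.mod (i * inc) 10007) (PySem.List.pyGetD deck i 0))
        (List.replicate 10007 0))[((i : Int) * inc % 10007).toNat]? = deck[i]?) ∧
    (∀ q : Nat, q < 10007 → (∀ i : Nat, i < n → ((i : Int) * inc % 10007).toNat ≠ q) →
      ((PySem.List.pyRange 0 (n : Int) 1).foldl
        (fun nd i =>
          PySem.List.pySetD nd (PySem.Int.mod (i * inc) 10007) (PySem.List.pyGetD deck i 0))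
        (List.replicate 10007 0))[q]? = some 0) := by
  induction n with
  | zero =>
    rw [show ((0 : Nat) : Int) = 0 by norm_num, PySem.List.pyRange_one_eq_nil (by norm_num)]
    refine ⟨by rw [List.foldl_nil, List.length_replicate], fun i hi => absurd hi (by omega), ?_⟩
    intro q hq _
    rw [List.foldl_nil, List.getElem?_replicate, if_pos hq]
  | succ n ih =>
    obtain ⟨ihlen, ih2, ih3⟩ := ih (by omega)
    have hcast : ((n + 1 : Nat) : Int) = (n : Int) + 1 := by push_cast; ring
    rw [hcast, PySem.List.pyRange_one_succ_right (by positivity), List.foldl_append]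
    simp only [List.foldl_cons, List.foldl_nil]
    have hmod : PySem.Int.mod ((n : Int) * inc) 10007 = (n : Int) * inc % 10007 :=
      PySem.Int.mod_eq_emod_of_pos (by norm_num)
    have hnn : (0 : Int) ≤ (n : Int) * inc % 10007 := Int.emod_nonneg _ (by norm_num)
    have hlt : (n : Int) * inc % 10007 < 10007 := Int.emod_lt_of_pos _ (by norm_num)
    rw [hmod, PySem.List.pySetD_of_nonneg _ _ hnn]
    set F := (PySem.List.pyRange 0 (n : Int) 1).foldl
        (fun nd i =>
          PySem.List.pySetD nd (PySem.Int.mod (i * inc) 10007) (PySem.List.pyGetD deck i 0))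
        (List.replicate 10007 0) with hF
    have hσn : ((n : Int) * inc % 10007).toNat < 10007 := by omega
    refine ⟨by simp [ihlen], ?_, ?_⟩
    · intro i hi
      by_cases hin : i = n
      · subst hin
        rw [List.getElem?_set_self (by omega)]
        rw [PySem.List.pyGetD_eq_getElem deck 0 (by positivity) (by omega)]
        rw [List.getElem?_eq_getElem (show i < deck.length by omega)]
        simp
      · rw [List.getElem?_set_ne]
        · exact ih2 i (by omega)
        · intro hcontra
          exact hin (sigma_inj hinc (by omega) (by omega) hcontra).symm
    · intro q hq hnone
      rw [List.getElem?_set_ne (hnone n (by omega))]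
      exact ih3 q hq (fun i hi => hnone i (by omega))

theorem inv_deal {deck : List Int} {pos : Int} (h : DeckInv deck pos) (inc : Int)
    (hinc : PySem.Int.mod inc 10007 ≠ 0) :
    DeckInv (pyDeal deck inc) (PySem.Int.mod (pos * inc) 10007) := by
  obtain ⟨hlen, h0, h1, hq⟩ := h
  have hdvd : ¬ (10007 : Int) ∣ inc := by
    rw [← PySem.Int.mod_eq_zero_iff_dvd]; exact hinc
  unfold pyDeal
  have hcast : ((deck.length : Int)) = 10007 := by exact_mod_cast congrArg (Nat.cast : Nat → Int) hlen
  rw [hcast]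
  obtain ⟨hL, h2, h3⟩ := deal_fold deck hlen inc hdvd 10007 le_rfl
  rw [show ((10007 : Nat) : Int) = (10007 : Int) by norm_num] at hL h2 h3
  have hmodp : PySem.Int.mod (pos * inc) 10007 = pos * inc % 10007 :=
    PySem.Int.mod_eq_emod_of_pos (by norm_num)
  have hnn : (0 : Int) ≤ pos * inc % 10007 := Int.emod_nonneg _ (by norm_num)
  have hlt : pos * inc % 10007 < 10007 := Int.emod_lt_of_pos _ (by norm_num)
  rw [hmodp]
  refine ⟨hL, hnn, hlt, ?_⟩
  intro q hq'
  set p := pos.toNat with hpdef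
  have hp : (p : Int) = pos := Int.toNat_of_nonneg h0
  have hplt : p < 10007 := by omega
  have hσp : ((p : Int) * inc % 10007).toNat = (pos * inc % 10007).toNat := by rw [hp]
  by_cases hqp : q = ((p : Int) * inc % 10007).toNat
  · subst hqp
    rw [h2 p hplt, hq p hplt]
    constructor
    · intro _; omega
    · intro _; omega
  · constructor
    · intro hres
      exfalso
      by_cases hex : ∃ i : Nat, i < 10007 ∧ ((i : Int) * inc % 10007).toNat = q
      · obtain ⟨i, hi, hiq⟩ := hex
        rw [← hiq, h2 i hi, hq i hi] at hres
        have : i = p := by omega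
        subst this
        exact hqp hiq.symm
      · push Not at hex
        rw [h3 q hq' (fun i hi => hex i hi)] at hres
        simp at hres
    · intro hqv
      exfalso
      exact hqp (by omega)

theorem inv_step {deck : List Int} {pos : Int} (h : DeckInv deck pos) (line : String)
    (hpre : preLine line = true) : DeckInv (stepA deck line) (stepB pos line) := by
  simp only [preLine] at hpre
  simp only [stepA, stepB]
  by_cases hnil : PySem.Str.split₀ line = []
  · rw [if_pos hnil] at hpre
    exact absurd hpre (by simp)
  · simp only [if_neg hnil] at hpre
    by_cases h1 : PySem.List.pyGetD (PySem.Str.split₀ line) (-1) "" = "stack"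
    · simp only [if_pos h1]
      exact inv_reverse h
    · simp only [if_neg h1] at hpre ⊢
      by_cases h2 : PySem.List.pyGetD (PySem.Str.split₀ line) 0 "" = "cut"
      · simp only [if_pos h2]
        exact inv_rot h _
      · simp only [if_neg h2] at hpre ⊢
        by_cases h3 : PySem.List.pyGetD (PySem.Str.split₀ line) 0 "" = "deal"
        · simp only [if_pos h3] at hpre ⊢
          rcases hof : PySem.Int.ofStr? (PySem.List.pyGetD (PySem.Str.split₀ line) (-1) "") with _ | k
          · rw [hof] at hpre
            exact absurd hpre (by simp)
          · rw [hof] at hpre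
            simpa [hof] using inv_deal h k (by simpa using hpre)
        · simp only [if_neg h3]
          exact h

theorem index?_eq_of_getElem? {xs : List Int} {v : Int} {k : Nat} (hk : k < xs.length)
    (hx : xs[k]? = some v) (hne : ∀ j : Nat, j < k → xs[j]? ≠ some v) :
    PySem.List.index? xs v = some k := by
  rw [PySem.List.index?_eq_some_iff]
  refine ⟨xs.take k, xs.drop (k + 1), ?_, by simp; omega, ?_⟩
  · have hxk : xs[k] = v := by
      rw [List.getElem?_eq_getElem hk] at hx
      exact Option.some.inj hx
    conv_lhs => rw [← List.take_append_drop k xs]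
    rw [List.drop_eq_getElem_cons hk, hxk]
  · intro hmem
    obtain ⟨j, hj, hjv⟩ := List.getElem_of_mem hmem
    have hjk : j < k := by simp at hj; omega
    apply hne j hjk
    rw [List.getElem?_eq_getElem (by omega)]
    rw [← hjv]
    simp [List.getElem_take]

theorem inv_index {deck : List Int} {pos : Int} (h : DeckInv deck pos) :
    ((PySem.List.index? deck 2019).getD 0 : Int) = pos := by
  obtain ⟨hlen, h0, h1, hq⟩ := h
  set p := pos.toNat with hpdef
  have hp : (p : Int) = pos := Int.toNat_of_nonneg h0
  have hidx : PySem.List.index? deck 2019 = some p := by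
    apply index?_eq_of_getElem? (by omega)
    · rw [hq p (by omega)]; omega
    · intro j hj
      rw [ne_eq, hq j (by omega)]
      omega
  rw [hidx]
  simpa using hp

theorem inv_fold {data : List String} (hpre : data.all preLine = true)
    {deck : List Int} {pos : Int} (h : DeckInv deck pos) :
    DeckInv (data.foldl stepA deck) (data.foldl stepB pos) := by
  induction data generalizing deck pos with
  | nil => exact h
  | cons line rest ih =>
    simp only [List.all_cons, Bool.and_eq_true] at hpre
    exact ih hpre.2 (inv_step h line hpre.1)

-- ===== VERDICT (by name: the statement is the Claim_ definition above) =====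
theorem part_1_spec : Claim_equal_part_1 := by
  intro data _ hpre
  unfold Spec_part_1 part_1 part_1_alt
  exact inv_index (inv_fold hpre inv_init)
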